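-- pv_equiv track=rewrite | github.com/JPS4321/Keys_Criptography | Ascii_K_dynamic.py | cifrar_ascii_llave_dinamica
-- ===== SOURCE A (Python) =====
-- def generar_llave_dinamica_ascii(semilla, longitud):
--     llave = []
--     k = ord(semilla) - 32
--
--     for i in range(longitud):
--         k = (k + i) % 95
--         llave.append(k)
--
--     return llave
--
-- def cifrar_ascii_llave_dinamica(mensaje, semilla):
--     cipher = ""
--     llave_dinamica = generar_llave_dinamica_ascii(semilla, len(mensaje))
--
--     for i in range(len(mensaje)):
--         ascii_m = ord(mensaje[i]) - 32
--         ascii_k = llave_dinamica[i]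
--
--         ascii_c = (ascii_m + ascii_k) % 95
--         cipher += chr(ascii_c + 32)
--
--     return cipher
-- ===== SOURCE B (Python) =====
-- def cifrar_ascii_llave_dinamica(mensaje, semilla):
--     k0 = ord(semilla) - 32
--     return ''.join(chr((ord(c) - 32 + k0 + i * (i + 1) // 2) % 95 + 32)
--                    for i, c in enumerate(mensaje))
-- ===== Notes on version B (the rewrite author's own statement) =====
-- stated objective: simpler
-- what changed: Removed the generar_llave_dinamica_ascii helper and its precomputed key list: the key for position i is computed inline by the closed-form triangular number (k0 + i*(i+1)//2) % 95, and the output is built with a single join over enumerate instead of string concatenation in a loop.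
import Mathlib
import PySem

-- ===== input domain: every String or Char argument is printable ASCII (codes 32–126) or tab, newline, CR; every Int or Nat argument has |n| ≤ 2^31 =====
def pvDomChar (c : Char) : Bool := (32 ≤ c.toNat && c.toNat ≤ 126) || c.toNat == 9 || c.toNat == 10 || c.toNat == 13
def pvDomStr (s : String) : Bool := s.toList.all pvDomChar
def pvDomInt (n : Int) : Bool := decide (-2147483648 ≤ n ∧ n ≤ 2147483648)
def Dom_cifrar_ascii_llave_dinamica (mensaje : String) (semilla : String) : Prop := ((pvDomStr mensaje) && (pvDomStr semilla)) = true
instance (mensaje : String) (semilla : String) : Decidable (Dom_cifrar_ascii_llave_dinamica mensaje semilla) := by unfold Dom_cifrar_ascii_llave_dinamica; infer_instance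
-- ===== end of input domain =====

-- B drops A's precomputed key list: the key at position i is the closed-form triangular
-- number (k0 + i*(i+1)//2) % 95 computed inline in a single join over enumerate (objective: simpler).

-- ===== PORT A =====
def generar_llave_dinamica_ascii (semilla : String) (longitud : Nat) : List Int :=
  -- ord(semilla) - 32; Pre_ guarantees semilla has exactly one character
  let k0 : Int := ((semilla.toList.headD ' ').toNat : Int) - 32
  ((List.range longitud).foldl
    (fun (st : Int × List Int) (i : Nat) =>
      let k := PySem.Int.mod (st.1 + (i : Int)) 95
      (k, st.2 ++ [k]))
    (k0, ([] : List Int))).2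

def cifrar_ascii_llave_dinamica (mensaje : String) (semilla : String) : String :=
  let ms := mensaje.toList
  let llave := generar_llave_dinamica_ascii semilla ms.length
  -- index accesses mensaje[i] and llave_dinamica[i] are always in range (i < len)
  String.mk ((List.range ms.length).foldl
    (fun cipher i =>
      let ascii_m : Int := ((ms.getD i ' ').toNat : Int) - 32
      let ascii_k : Int := llave.getD i 0
      let ascii_c : Int := PySem.Int.mod (ascii_m + ascii_k) 95
      cipher ++ [Char.ofNat (ascii_c + 32).toNat]) [])

-- ===== PORT B =====
def cifrar_ascii_llave_dinamica_alt (mensaje : String) (semilla : String) : String :=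
  let k0 : Int := ((semilla.toList.headD ' ').toNat : Int) - 32
  String.mk ((PySem.List.enumerate mensaje.toList).map
    (fun p =>
      Char.ofNat ((PySem.Int.mod (((p.2.toNat : Int) - 32) + k0 +
        PySem.Int.floordiv (p.1 * (p.1 + 1)) 2) 95 + 32).toNat)))

-- ===== PRECONDITION & SPEC =====
-- Pre_ excludes seeds that are not exactly one character: there Python's ord(semilla) raises TypeError.
def Pre_cifrar_ascii_llave_dinamica (mensaje : String) (semilla : String) : Prop :=
  semilla.toList.length = 1
instance (mensaje : String) (semilla : String) : Decidable (Pre_cifrar_ascii_llave_dinamica mensaje semilla) := by unfold Pre_cifrar_ascii_llave_dinamica; infer_instance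
def pvWitness_cifrar_ascii_llave_dinamica : String × String := ("Hola mundo!", "K")

def Spec_cifrar_ascii_llave_dinamica (mensaje : String) (semilla : String) (out : String) : Prop := out = cifrar_ascii_llave_dinamica_alt mensaje semilla
instance (mensaje : String) (semilla : String) (out : String) : Decidable (Spec_cifrar_ascii_llave_dinamica mensaje semilla out) := by unfold Spec_cifrar_ascii_llave_dinamica; infer_instance

-- ===== CLAIM (what is proved, stated in full; the proofs are below) =====
def Claim_equal_cifrar_ascii_llave_dinamica : Prop := ∀ (mensaje : String) (semilla : String), Dom_cifrar_ascii_llave_dinamica mensaje semilla → Pre_cifrar_ascii_llave_dinamica mensaje semilla → Spec_cifrar_ascii_llave_dinamica mensaje semilla (cifrar_ascii_llave_dinamica mensaje semilla)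

-- ===== LEMMAS AND PROOFS =====

-- triangular number as a Nat, and its recurrence
def pvTri (i : Nat) : Nat := i * (i + 1) / 2

theorem pvTri_succ (m : Nat) : pvTri (m + 1) = pvTri m + (m + 1) := by
  unfold pvTri
  have h : (m + 1) * (m + 1 + 1) = m * (m + 1) + (m + 1) * 2 := by ring
  rw [h, Nat.add_mul_div_right _ _ (by norm_num : 0 < 2)]

-- A's key list is the pointwise closed form (together with the running key)
theorem gen_fold_spec (k0 : Int) (n : Nat) :
    (List.range n).foldl
      (fun (st : Int × List Int) (i : Nat) =>
        let k := PySem.Int.mod (st.1 + (i : Int)) 95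
        (k, st.2 ++ [k]))
      (k0, ([] : List Int))
    = ((if n = 0 then k0 else PySem.Int.mod (k0 + (pvTri (n - 1) : Int)) 95),
       (List.range n).map (fun i => PySem.Int.mod (k0 + (pvTri i : Int)) 95)) := by
  induction n with
  | zero => simp
  | succ m ih =>
    rw [List.range_succ, List.foldl_append, ih, List.map_append]
    simp only [List.foldl_cons, List.foldl_nil, List.map_cons, List.map_nil]
    have hstep : PySem.Int.mod ((if m = 0 then k0 else PySem.Int.mod (k0 + (pvTri (m - 1) : Int)) 95) + (m : Int)) 95
        = PySem.Int.mod (k0 + (pvTri m : Int)) 95 := by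
      cases m with
      | zero => simp [pvTri]
      | succ j =>
        simp only [Nat.succ_ne_zero, if_false, Nat.add_sub_cancel,
          PySem.Int.mod_eq_emod_of_pos (show (0:Int) < 95 by norm_num)]
        have h2 : (pvTri (j + 1) : Int) = (pvTri j : Int) + ((j : Int) + 1) := by
          push_cast [pvTri_succ j]; ring
        rw [h2]; omega
    rw [hstep]
    simp

-- a foldl that appends one element per index is a map
theorem foldl_append_singleton {α β : Type} (g : α → β) (l : List α) (acc : List β) :
    l.foldl (fun c i => c ++ [g i]) acc = acc ++ l.map g := by
  induction l generalizing acc with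
  | nil => simp
  | cons x xs ih => simp [ih]

theorem char_eq_pointwise (k0 m : Int) (k : Nat) :
    Char.ofNat ((PySem.Int.mod ((m - 32) + PySem.Int.mod (k0 + (pvTri k : Int)) 95) 95 + 32).toNat)
    = Char.ofNat ((PySem.Int.mod ((m - 32) + k0 + PySem.Int.floordiv ((k : Int) * ((k : Int) + 1)) 2) 95 + 32).toNat) := by
  have hfd : PySem.Int.floordiv ((k : Int) * ((k : Int) + 1)) 2 = (pvTri k : Int) := by
    have h1 : ((k : Int) * ((k : Int) + 1)) = ((k * (k + 1) : Nat) : Int) := by push_cast; ring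
    rw [h1]
    exact_mod_cast PySem.Int.floordiv_natCast (k * (k + 1)) 2
  rw [hfd]
  have hmod : PySem.Int.mod ((m - 32) + PySem.Int.mod (k0 + (pvTri k : Int)) 95) 95
      = PySem.Int.mod ((m - 32) + k0 + (pvTri k : Int)) 95 := by
    simp only [PySem.Int.mod_eq_emod_of_pos (show (0:Int) < 95 by norm_num)]
    omega
  rw [hmod]

-- ===== VERDICT (by name: the statement is the Claim_ definition above) =====
theorem cifrar_ascii_llave_dinamica_spec : Claim_equal_cifrar_ascii_llave_dinamica := by
  intro mensaje semilla _ _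
  unfold Spec_cifrar_ascii_llave_dinamica cifrar_ascii_llave_dinamica cifrar_ascii_llave_dinamica_alt generar_llave_dinamica_ascii
  simp only [gen_fold_spec]
  set k0 : Int := ((semilla.toList.headD ' ').toNat : Int) - 32 with hk0
  set ms := mensaje.toList with hms
  rw [foldl_append_singleton]
  simp only [List.nil_append]
  congr 1
  apply List.ext_getElem
  · simp [PySem.List.length_enumerate]
  · intro k h1 h2
    simp only [List.getElem_map, List.getElem_range, PySem.List.getElem_enumerate]
    have hk : k < ms.length := by simpa using h1
    have hget : ms.getD k ' ' = ms[k] := List.getD_eq_getElem ms ' ' hk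
    have hllave : ((List.range ms.length).map (fun i => PySem.Int.mod (k0 + (pvTri i : Int)) 95)).getD k 0
        = PySem.Int.mod (k0 + (pvTri k : Int)) 95 := by
      rw [List.getD_eq_getElem _ _ (by simpa using hk)]
      simp
    simp only [hget, hllave, zero_add]
    exact char_eq_pointwise k0 ((ms[k].toNat : Int)) k
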